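-- pv_equiv track=rewrite | github.com/RoKivals/Exam-Programming-EGE | EGE#24/N24_1.py | check
-- ===== SOURCE A (Python) =====
-- def check(elem: str) -> int:
--     max_len = 0
--     if elem.count("G") >= 25:
--         pass
--     else:
--         for sym in elem:
--             if elem.count(sym) > 1:
--                 max_len = max(max_len, elem.rfind(sym) - elem.find(sym))
--     return max_len
-- ===== SOURCE B (Python) =====
-- def check(elem: str) -> int:
--     if elem.count("G") >= 25:
--         return 0
--     first = {}
--     best = 0
--     for i, c in enumerate(elem):
--         if c in first:
--             best = max(best, i - first[c])
--         else:
--             first[c] = i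
--     return best
-- ===== Notes on version B (the rewrite author's own statement) =====
-- stated objective: faster
-- what changed: Replaced A's per-character rescans of the whole string (count, find, rfind for every position) by a single left-to-right pass that records each character's first index in a dict and maximizes current_index - first_index.
import Mathlib
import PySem

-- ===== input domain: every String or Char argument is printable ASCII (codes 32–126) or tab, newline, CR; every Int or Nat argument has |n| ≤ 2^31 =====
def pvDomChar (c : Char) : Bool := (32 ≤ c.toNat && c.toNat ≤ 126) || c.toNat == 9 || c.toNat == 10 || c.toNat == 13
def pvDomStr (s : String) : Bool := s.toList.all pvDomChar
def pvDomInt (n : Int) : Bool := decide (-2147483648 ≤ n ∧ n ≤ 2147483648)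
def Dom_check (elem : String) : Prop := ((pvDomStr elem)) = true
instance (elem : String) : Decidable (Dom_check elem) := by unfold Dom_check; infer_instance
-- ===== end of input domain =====

-- B replaces A's per-character rescans (count/find/rfind for every position, O(n^2)) by one
-- left-to-right pass that stores each character's first index in a dict, O(n); same value.

-- ===== PORT A =====
-- literal port of Source A: for each sym in elem, if elem.count(sym) > 1,
-- max_len = max(max_len, elem.rfind(sym) - elem.find(sym))
def check (elem : String) : Int :=
  let max_len : Int := 0
  if 25 ≤ PySem.Str.count elem "G" then
    max_len
  else
    elem.toList.foldl (fun max_len sym =>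
      if 1 < PySem.Str.count elem (String.singleton sym) then
        max max_len (PySem.Str.rfind elem (String.singleton sym) -
                     PySem.Str.find elem (String.singleton sym))
      else max_len) max_len

-- ===== PORT B =====
-- loop body of Source B: state = (first-index dict, best); `first[c]` is read as getD under
-- the `c in first` guard, where it is exact (the key is present)
def check_alt_step (st : PySem.Dict Char Int × Int) (p : Int × Char) :
    PySem.Dict Char Int × Int :=
  if st.1.contains p.2 then (st.1, max st.2 (p.1 - st.1.getD p.2 0))
  else (st.1.insert p.2 p.1, st.2)

def check_alt (elem : String) : Int :=
  if 25 ≤ PySem.Str.count elem "G" then 0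
  else
    ((PySem.List.enumerate elem.toList 0).foldl check_alt_step (PySem.Dict.empty, 0)).2

-- ===== PRECONDITION & SPEC =====
def Spec_check (elem : String) (out : Int) : Prop := out = check_alt elem
instance (elem : String) (out : Int) : Decidable (Spec_check elem out) := by
  unfold Spec_check; infer_instance

-- ===== CLAIM (what is proved, stated in full; the proofs are below) =====
def Claim_equal_check : Prop := ∀ (elem : String), Dom_check elem → Spec_check elem (check elem)

-- ===== LEMMAS AND PROOFS =====

-- value contributed by one character in A's pass (0 where A skips)
def gval (l : List Char) (c : Char) : Int :=
  if 1 < l.count c then PySem.Chars.rfind l [c] - PySem.Chars.find l [c] else 0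

-- value contributed by one (index, character) pair in B's pass (0 where B only records)
def hval (l : List Char) (p : Int × Char) : Int :=
  if p.2 ∈ l.take p.1.toNat then p.1 - PySem.Chars.find l [p.2] else 0

-- [c] is a prefix of t iff t starts with c
theorem prefix_singleton (c : Char) (t : List Char) : [c] <+: t ↔ t.head? = some c := by
  constructor
  · rintro ⟨u, rfl⟩; rfl
  · intro h; cases t with
    | nil => simp at h
    | cons x t => simp at h; exact ⟨t, by simp [h]⟩

theorem prefix_drop_iff (l : List Char) (i : Nat) (c : Char) :
    [c] <+: l.drop i ↔ l[i]? = some c := by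
  rw [prefix_singleton, List.head?_drop]

theorem find_nonneg_of_mem {l : List Char} {c : Char} (h : c ∈ l) :
    0 ≤ PySem.Chars.find l [c] := by
  rw [PySem.Chars.find_nonneg_iff]
  obtain ⟨i, hi⟩ := List.mem_iff_getElem?.1 h
  exact ((prefix_drop_iff l i c).2 hi).isInfix.trans (List.drop_suffix i l).isInfix

theorem find_occ {l : List Char} {c : Char} (h : c ∈ l) :
    l[(PySem.Chars.find l [c]).toNat]? = some c :=
  (prefix_drop_iff _ _ _).1 (PySem.Chars.find_spec (find_nonneg_of_mem h)).1

theorem find_min {l : List Char} {c : Char} {i : Nat} (h : c ∈ l) (hi : l[i]? = some c) :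
    (PySem.Chars.find l [c]).toNat ≤ i := by
  by_contra hlt
  exact (PySem.Chars.find_spec (find_nonneg_of_mem h)).2 i (by omega)
    ((prefix_drop_iff l i c).2 hi)

-- rfind.go unfolding equations
theorem rfind_go_zero (l sub : List Char) :
    PySem.Chars.rfind.go l sub 0 = if sub.isPrefixOf l then 0 else -1 := rfl

theorem rfind_go_succ (l sub : List Char) (j : Nat) :
    PySem.Chars.rfind.go l sub (j+1)
      = if sub.isPrefixOf (l.drop (j+1)) then ((j : Int)+1)
        else PySem.Chars.rfind.go l sub j := by
  rw [PySem.Chars.rfind.go]; norm_num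

-- rfind.go: occurrence at the returned index, and it is ≥ every occurrence index ≤ k
theorem rfind_go_occ (l : List Char) (c : Char) :
    ∀ k : Nat, 0 ≤ PySem.Chars.rfind.go l [c] k →
      l[(PySem.Chars.rfind.go l [c] k).toNat]? = some c := by
  intro k
  induction k with
  | zero =>
    intro h0
    rw [rfind_go_zero] at h0 ⊢
    by_cases hp : List.isPrefixOf [c] l = true
    · rw [if_pos hp] at h0 ⊢
      simpa using (prefix_drop_iff l 0 c).1 (by simpa using List.isPrefixOf_iff_prefix.1 hp)
    · rw [if_neg hp] at h0; omega
  | succ j ih =>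
    intro h0
    rw [rfind_go_succ] at h0 ⊢
    by_cases hp : List.isPrefixOf [c] (l.drop (j+1)) = true
    · rw [if_pos hp]
      have := (prefix_drop_iff l (j+1) c).1 (List.isPrefixOf_iff_prefix.1 hp)
      simpa using this
    · rw [if_neg hp] at h0 ⊢
      exact ih h0

theorem rfind_go_ge (l : List Char) (c : Char) :
    ∀ (k i : Nat), i ≤ k → l[i]? = some c → (i : Int) ≤ PySem.Chars.rfind.go l [c] k := by
  intro k
  induction k with
  | zero =>
    intro i hik hi
    interval_cases i
    rw [rfind_go_zero,
      if_pos (List.isPrefixOf_iff_prefix.2 (by simpa using (prefix_drop_iff l 0 c).2 hi))]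
    simp
  | succ j ih =>
    intro i hik hi
    rw [rfind_go_succ]
    by_cases hp : List.isPrefixOf [c] (l.drop (j+1)) = true
    · rw [if_pos hp]; omega
    · rw [if_neg hp]
      rcases Nat.lt_or_ge i (j+1) with h | h
      · exact ih i (by omega) hi
      · have hij : i = j + 1 := by omega
        rw [hij] at hi
        exact absurd (List.isPrefixOf_iff_prefix.2 ((prefix_drop_iff l (j+1) c).2 hi)) hp

theorem rfind_ge {l : List Char} {c : Char} {i : Nat} (hi : l[i]? = some c) :
    (i : Int) ≤ PySem.Chars.rfind l [c] := by
  have hlen : i < l.length := (List.getElem?_eq_some_iff.1 hi).1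
  exact rfind_go_ge l c l.length i (by omega) hi

theorem rfind_occ {l : List Char} {c : Char} (h : c ∈ l) :
    l[(PySem.Chars.rfind l [c]).toNat]? = some c := by
  obtain ⟨i, hi⟩ := List.mem_iff_getElem?.1 h
  exact rfind_go_occ l c l.length (le_trans (by positivity) (rfind_ge hi))

-- Chars.count with a single character is List.count
theorem count_go_singleton (c : Char) :
    ∀ (l : List Char) (fuel acc : Nat), l.length ≤ fuel →
      PySem.Chars.count.go [c] fuel l acc = acc + l.count c := by
  intro l
  induction l with
  | nil =>
    intro fuel acc _
    cases fuel <;> rw [PySem.Chars.count.go] <;> simp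
  | cons h t ih =>
    intro fuel acc hf
    cases fuel with
    | zero => simp at hf
    | succ f =>
      simp only [List.length_cons] at hf
      rw [PySem.Chars.count.go]
      by_cases hc : c = h
      · rw [if_pos (by simp [List.isPrefixOf, hc])]
        have hdrop : List.drop [c].length (h :: t) = t := by simp
        rw [hdrop, ih f (acc+1) (by omega)]
        simp [hc]
        omega
      · rw [if_neg (by simp [List.isPrefixOf, hc])]
        rw [ih f acc (by omega)]
        have : (h :: t).count c = t.count c := by
          rw [List.count_cons, if_neg (by simpa using fun hh : h = c => hc hh.symm)]
          simp
        rw [this]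

theorem count_singleton (l : List Char) (c : Char) :
    PySem.Chars.count l [c] = l.count c := by
  rw [PySem.Chars.count]
  rw [if_neg (by simp)]
  simpa using count_go_singleton c l l.length 0 le_rfl

-- two occurrences give count ≥ 2, and conversely
theorem two_le_count_of_occ {l : List Char} {c : Char} {i j : Nat} (hij : i < j)
    (hi : l[i]? = some c) (hj : l[j]? = some c) : 2 ≤ l.count c := by
  have h1 : c ∈ l.take j := by
    refine List.mem_iff_getElem?.2 ⟨i, ?_⟩
    rw [List.getElem?_take]; simp [hij, hi]
  have h2 : c ∈ l.drop j := by
    refine List.mem_iff_getElem?.2 ⟨0, ?_⟩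
    simpa [List.head?_drop] using hj
  calc 2 ≤ (l.take j).count c + (l.drop j).count c := by
        have := List.count_pos_iff.2 h1
        have := List.count_pos_iff.2 h2
        omega
    _ = l.count c := by rw [← List.count_append, List.take_append_drop]

theorem occ2_of_two_le_count {c : Char} :
    ∀ {l : List Char}, 2 ≤ l.count c → ∃ i j : Nat, i < j ∧ l[i]? = some c ∧ l[j]? = some c := by
  intro l
  induction l with
  | nil => intro h; simp at h
  | cons x t ih =>
    intro h
    by_cases hx : x = c
    · have ht : c ∈ t := by
        by_contra hm
        simp [hx, List.count_eq_zero.2 hm] at h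
      obtain ⟨j, hj⟩ := List.mem_iff_getElem?.1 ht
      exact ⟨0, j+1, by omega, by simp [hx], by simpa using hj⟩
    · have h2 : 2 ≤ t.count c := by
        have hcx : (x :: t).count c = t.count c := by
          rw [List.count_cons, if_neg (by simpa using fun hh : x = c => hx hh)]
          simp
        omega
      obtain ⟨i, j, hij, hi, hj⟩ := ih h2
      exact ⟨i+1, j+1, by omega, by simpa using hi, by simpa using hj⟩

theorem find_lt_rfind {l : List Char} {c : Char} (h2 : 2 ≤ l.count c) :
    PySem.Chars.find l [c] < PySem.Chars.rfind l [c] := by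
  obtain ⟨i, j, hij, hi, hj⟩ := occ2_of_two_le_count h2
  have hm : c ∈ l := List.mem_iff_getElem?.2 ⟨i, hi⟩
  have h1 := find_min hm hi
  have h3 := rfind_ge hj
  have h0 := find_nonneg_of_mem hm
  omega

-- generic foldl-max lemmas
theorem foldl_max_le (L : List Int) : ∀ (a M : Int), a ≤ M → (∀ x ∈ L, x ≤ M) →
    L.foldl max a ≤ M := by
  induction L with
  | nil => intro a M ha _; simpa using ha
  | cons x t ih =>
    intro a M ha h
    simp only [List.foldl_cons]
    exact ih _ M (max_le ha (h x (by simp))) (fun y hy => h y (by simp [hy]))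

theorem foldl_if_max {α : Type} (p : α → Prop) [DecidablePred p] (v : α → Int) :
    ∀ (l : List α) (a : Int), 0 ≤ a →
      l.foldl (fun m c => if p c then max m (v c) else m) a
        = (l.map fun c => if p c then v c else 0).foldl max a := by
  intro l
  induction l with
  | nil => intro a _; rfl
  | cons x t ih =>
    intro a ha
    simp only [List.foldl_cons, List.map_cons]
    by_cases hp : p x
    · rw [if_pos hp, if_pos hp, ih _ (le_trans ha (le_max_left a (v x)))]
    · rw [if_neg hp, if_neg hp, ih _ ha, max_eq_left ha]

-- B's dict loop equals the dict-free fold of hval, by invariant: the dict maps every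
-- character of the processed prefix to its first index in the whole list
theorem loop_spec (l : List Char) :
    ∀ (suf pre : List Char) (d : PySem.Dict Char Int) (b : Int),
      l = pre ++ suf →
      (∀ c : Char, d.get? c = if c ∈ pre then some (PySem.Chars.find l [c]) else none) →
      0 ≤ b →
      ((PySem.List.enumerate suf (pre.length : Int)).foldl check_alt_step (d, b)).2
        = ((PySem.List.enumerate suf (pre.length : Int)).map (hval l)).foldl max b := by
  intro suf
  induction suf with
  | nil => intro pre d b _ _ _; simp [PySem.List.enumerate_nil]
  | cons c suf ih =>
    intro pre d b hl hinv hb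
    rw [PySem.List.enumerate_cons]
    have hlen1 : ((pre.length : Int) + 1) = (((pre ++ [c]).length : Nat) : Int) := by
      simp
    have hocc : l[pre.length]? = some c := by
      rw [← List.head?_drop, hl, List.drop_left]; rfl
    have hcmem : c ∈ l := List.mem_iff_getElem?.2 ⟨pre.length, hocc⟩
    have htake : l.take pre.length = pre := by rw [hl]; exact List.take_left
    by_cases hmem : c ∈ pre
    · -- seen before: best is updated with i - first[c]
      have hget : d.get? c = some (PySem.Chars.find l [c]) := by rw [hinv c, if_pos hmem]
      have hcont : d.contains c = true := by
        by_contra h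
        have hnone : d.get? c = none :=
          (PySem.Dict.get?_eq_none_iff_contains d c).2 (by simpa using h)
        rw [hget] at hnone
        simp at hnone
      have hstep : check_alt_step (d, b) ((pre.length : Int), c)
          = (d, max b ((pre.length : Int) - PySem.Chars.find l [c])) := by
        simp [check_alt_step, hcont, PySem.Dict.getD, hget]
      have hhval : hval l ((pre.length : Int), c)
          = (pre.length : Int) - PySem.Chars.find l [c] := by
        simp [hval, htake, hmem]
      rw [List.foldl_cons, hstep, List.map_cons, List.foldl_cons, hhval, hlen1]
      exact ih (pre ++ [c]) d _ (by simp [hl]) (fun c' => by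
          rw [hinv c']
          by_cases h' : c' ∈ pre
          · simp [h', List.mem_append]
          · have : ¬ c' ∈ pre ++ [c] := by
              simp [List.mem_append, h']
              intro he; exact absurd (he ▸ hmem) h'
            simp [h', this])
        (le_trans hb (le_max_left _ _))
    · -- first sight: record first index; F l c is exactly this position
      have hget : d.get? c = none := by rw [hinv c, if_neg hmem]
      have hcont : d.contains c = false := (PySem.Dict.get?_eq_none_iff_contains d c).1 hget
      have hF : PySem.Chars.find l [c] = (pre.length : Int) := by
        have hle := find_min hcmem hocc
        have h0 := find_nonneg_of_mem hcmem
        have hocc' := find_occ hcmem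
        rcases Nat.lt_or_ge (PySem.Chars.find l [c]).toNat pre.length with hlt | hge
        · exfalso
          apply hmem
          refine List.mem_iff_getElem?.2 ⟨(PySem.Chars.find l [c]).toNat, ?_⟩
          have hsplit := List.getElem?_append_left (l₂ := c :: suf) hlt
          rw [← hl] at hsplit
          rw [← hsplit]
          exact hocc'
        · omega
      have hstep : check_alt_step (d, b) ((pre.length : Int), c)
          = (d.insert c (pre.length : Int), b) := by
        simp [check_alt_step, hcont]
      have hhval : hval l ((pre.length : Int), c) = 0 := by
        simp [hval, htake, hmem]
      rw [List.foldl_cons, hstep, List.map_cons, List.foldl_cons, hhval,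
          max_eq_left hb, hlen1]
      exact ih (pre ++ [c]) _ _ (by simp [hl]) (fun c' => by
          by_cases h' : c' = c
          · subst h'
            rw [PySem.Dict.get?_insert_self, if_pos (by simp), hF]
          · rw [PySem.Dict.get?_insert_of_ne _ _ h', hinv c']
            by_cases h'' : c' ∈ pre
            · simp [h'', List.mem_append]
            · simp [h'', List.mem_append, h'])
        hb

-- every A-contribution is bounded by B's fold
theorem bound_g {l : List Char} {c : Char} (hc : c ∈ l) :
    gval l c ≤ ((PySem.List.enumerate l 0).map (hval l)).foldl max 0 := by
  have hnn := (PySem.List.le_foldl_max ((PySem.List.enumerate l 0).map (hval l)) 0).1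
  by_cases h2 : 1 < l.count c
  · have hR := rfind_occ hc
    have hRlen : (PySem.Chars.rfind l [c]).toNat < l.length := (List.getElem?_eq_some_iff.1 hR).1
    have hF0 := find_nonneg_of_mem hc
    have hFR := find_lt_rfind (by omega : 2 ≤ l.count c)
    have hR0 : 0 ≤ PySem.Chars.rfind l [c] := by omega
    set j := (PySem.Chars.rfind l [c]).toNat with hj
    have hjc : l[j] = c := by
      have := (List.getElem?_eq_some_iff.1 hR).2
      simpa using this
    have hpmem : ((j : Int), c) ∈ PySem.List.enumerate l 0 := by
      rw [PySem.List.mem_enumerate_iff]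
      exact ⟨j, hRlen, by simp [hjc]⟩
    have hctake : c ∈ l.take j := by
      refine List.mem_iff_getElem?.2 ⟨(PySem.Chars.find l [c]).toNat, ?_⟩
      rw [List.getElem?_take, if_pos (by omega)]
      exact find_occ hc
    have hval_eq : hval l ((j : Int), c) = PySem.Chars.rfind l [c] - PySem.Chars.find l [c] := by
      simp only [hval]
      rw [if_pos (by simpa using hctake)]
      simp; omega
    have := (PySem.List.le_foldl_max ((PySem.List.enumerate l 0).map (hval l)) 0).2
      (hval l ((j : Int), c)) (List.mem_map_of_mem hpmem)
    rw [hval_eq] at this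
    simpa [gval, h2] using this
  · simpa [gval, h2] using hnn

-- every B-contribution is bounded by A's fold
theorem bound_h {l : List Char} {p : Int × Char} (hp : p ∈ PySem.List.enumerate l 0) :
    hval l p ≤ (l.map (gval l)).foldl max 0 := by
  have hnn := (PySem.List.le_foldl_max (l.map (gval l)) 0).1
  obtain ⟨k, hk, hpk⟩ := (PySem.List.mem_enumerate_iff l 0 p).1 hp
  subst hpk
  simp only [hval]
  by_cases hmem : l[k] ∈ (l.take ((0 + (k : Int)).toNat))
  · rw [if_pos hmem]
    set c := l[k] with hc
    have hocck : l[k]? = some c := by simp [hc]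
    obtain ⟨i, hi⟩ := List.mem_iff_getElem?.1 hmem
    rw [List.getElem?_take] at hi
    have hik : i < k := by
      by_contra h
      rw [if_neg (by simpa using h)] at hi; simp at hi
    rw [if_pos (by simpa using hik)] at hi
    have h2 : 2 ≤ l.count c := two_le_count_of_occ hik hi hocck
    have hcm : c ∈ l := List.mem_iff_getElem?.2 ⟨k, hocck⟩
    have hkR := rfind_ge hocck
    have hgv : gval l c = PySem.Chars.rfind l [c] - PySem.Chars.find l [c] := by
      simp [gval]; omega
    have := (PySem.List.le_foldl_max (l.map (gval l)) 0).2 (gval l c)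
      (List.mem_map_of_mem hcm)
    rw [hgv] at this
    omega
  · rw [if_neg hmem]; exact hnn

-- ===== VERDICT (by name: the statement is the Claim_ definition above) =====
theorem check_spec : Claim_equal_check := by
  intro elem _
  unfold Spec_check check check_alt
  by_cases hG : 25 ≤ PySem.Str.count elem "G"
  · rw [if_pos hG, if_pos hG]
  · rw [if_neg hG, if_neg hG]
    set l := elem.toList with hl
    have hfun : (fun (m : Int) (sym : Char) =>
        if 1 < PySem.Str.count elem (String.singleton sym) then
          max m (PySem.Str.rfind elem (String.singleton sym) -
                 PySem.Str.find elem (String.singleton sym))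
        else m)
        = fun (m : Int) (sym : Char) =>
            if 1 < l.count sym then
              max m (PySem.Chars.rfind l [sym] - PySem.Chars.find l [sym]) else m := by
      funext m sym
      rw [PySem.Str.count_eq, PySem.Str.rfind_eq, PySem.Str.find_eq,
          String.toList_singleton, ← hl, count_singleton]
    have hA : l.foldl (fun (m : Int) (sym : Char) =>
        if 1 < PySem.Str.count elem (String.singleton sym) then
          max m (PySem.Str.rfind elem (String.singleton sym) -
                 PySem.Str.find elem (String.singleton sym))
        else m) 0 = (l.map (gval l)).foldl max 0 := by
      rw [hfun]
      exact foldl_if_max (fun c => 1 < l.count c)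
        (fun c => PySem.Chars.rfind l [c] - PySem.Chars.find l [c]) l 0 le_rfl
    have hB : ((PySem.List.enumerate l 0).foldl check_alt_step (PySem.Dict.empty, 0)).2
        = ((PySem.List.enumerate l 0).map (hval l)).foldl max 0 := by
      have := loop_spec l l [] PySem.Dict.empty 0 (by simp)
        (fun c => by simp [PySem.Dict.get?_empty]) le_rfl
      simpa using this
    rw [hA, hB]
    apply le_antisymm
    · apply foldl_max_le
      · exact (PySem.List.le_foldl_max ((PySem.List.enumerate l 0).map (hval l)) 0).1
      · intro x hx
        obtain ⟨c, hc, rfl⟩ := List.mem_map.1 hx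
        exact bound_g hc
    · apply foldl_max_le
      · exact (PySem.List.le_foldl_max (l.map (gval l)) 0).1
      · intro x hx
        obtain ⟨p, hp, rfl⟩ := List.mem_map.1 hx
        exact bound_h hp
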